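-- pv_equiv track=rewrite | github.com/ManuelEsparcia/JimSimons | simons_smallcap_swing/research/label_horizon_ablation.py | _build_feature_families
-- ===== SOURCE A (Python) =====
-- from typing import Any, Iterable
--
-- def _build_feature_families(feature_cols: tuple[str, ...]) -> dict[str, tuple[str, ...]]:
--     cols = list(feature_cols)
--
--     def _pick(predicate: Any) -> tuple[str, ...]:
--         return tuple(sorted([c for c in cols if predicate(c)]))
--
--     price_momentum = _pick(lambda c: c.startswith("ret_") or "momentum" in c)
--     vol_liquidity = _pick(
--         lambda c: c.startswith("vol_") or "volume" in c or "turnover" in c or c.startswith("abs_ret_")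
--     )
--     market_context = _pick(lambda c: c.startswith("mkt_"))
--     fundamentals = _pick(lambda c: ("asset" in c) or ("share" in c) or ("revenue" in c) or ("income" in c))
--     return {
--         "price_momentum": price_momentum,
--         "vol_liquidity": vol_liquidity,
--         "market_context": market_context,
--         "fundamentals": fundamentals,
--         "all_features": tuple(sorted(cols)),
--         "price_plus_market": tuple(sorted(set(price_momentum) | set(market_context))),
--         "price_plus_fundamentals": tuple(sorted(set(price_momentum) | set(fundamentals))),
--     }
-- ===== SOURCE B (Python) =====
-- def _build_feature_families(feature_cols: tuple[str, ...]) -> dict[str, tuple[str, ...]]: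
--     # One pass over the columns: classify each column once into list buckets,
--     # keeping the two union buckets deduplicated as they are built.
--     price_momentum = []
--     vol_liquidity = []
--     market_context = []
--     fundamentals = []
--     all_features = []
--     price_plus_market = []
--     price_plus_fundamentals = []
--     for c in feature_cols:
--         is_pm = c.startswith("ret_") or "momentum" in c
--         is_mc = c.startswith("mkt_")
--         is_fd = ("asset" in c) or ("share" in c) or ("revenue" in c) or ("income" in c)
--         if is_pm:
--             price_momentum.append(c)
--         if c.startswith("vol_") or "volume" in c or "turnover" in c or c.startswith("abs_ret_"):
--             vol_liquidity.append(c)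
--         if is_mc:
--             market_context.append(c)
--         if is_fd:
--             fundamentals.append(c)
--         all_features.append(c)
--         if (is_pm or is_mc) and c not in price_plus_market:
--             price_plus_market.append(c)
--         if (is_pm or is_fd) and c not in price_plus_fundamentals:
--             price_plus_fundamentals.append(c)
--     return {
--         "price_momentum": tuple(sorted(price_momentum)),
--         "vol_liquidity": tuple(sorted(vol_liquidity)),
--         "market_context": tuple(sorted(market_context)),
--         "fundamentals": tuple(sorted(fundamentals)),
--         "all_features": tuple(sorted(all_features)),
--         "price_plus_market": tuple(sorted(price_plus_market)),
--         "price_plus_fundamentals": tuple(sorted(price_plus_fundamentals)),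
--     }
-- ===== Notes on version B (the rewrite author's own statement) =====
-- stated objective: alternative
-- what changed: Replaces the four independent filter-comprehensions plus the two set unions over already-built families with a single loop over the columns that classifies each column once into seven buckets (deduplicating the two union buckets on the fly), then sorts each bucket.
import Mathlib
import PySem

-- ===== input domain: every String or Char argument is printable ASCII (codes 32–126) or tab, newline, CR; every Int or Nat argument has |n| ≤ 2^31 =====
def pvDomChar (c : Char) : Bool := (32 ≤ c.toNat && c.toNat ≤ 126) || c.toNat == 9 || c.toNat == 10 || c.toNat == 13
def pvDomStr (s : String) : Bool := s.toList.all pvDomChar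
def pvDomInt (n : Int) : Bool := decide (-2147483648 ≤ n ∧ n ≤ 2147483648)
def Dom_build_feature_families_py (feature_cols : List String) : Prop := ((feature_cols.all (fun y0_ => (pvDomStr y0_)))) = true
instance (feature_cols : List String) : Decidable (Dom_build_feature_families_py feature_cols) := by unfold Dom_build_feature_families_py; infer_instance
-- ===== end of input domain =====

-- B replaces A's four filter passes and two set unions by one classifying loop; equivalence of the return value is proved (objective: alternative decomposition).

-- the four family predicates (shared text of both Python programs)
def bffIsPm (c : String) : Bool := PySem.Str.startswith c "ret_" || PySem.Str.isIn "momentum" c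
def bffIsVl (c : String) : Bool :=
  PySem.Str.startswith c "vol_" || PySem.Str.isIn "volume" c || PySem.Str.isIn "turnover" c || PySem.Str.startswith c "abs_ret_"
def bffIsMc (c : String) : Bool := PySem.Str.startswith c "mkt_"
def bffIsFd (c : String) : Bool :=
  PySem.Str.isIn "asset" c || PySem.Str.isIn "share" c || PySem.Str.isIn "revenue" c || PySem.Str.isIn "income" c

-- ===== PORT A =====
-- _pick(predicate) = tuple(sorted([c for c in cols if predicate(c)]))
def bffPick (cols : List String) (pred : String → Bool) : List String :=
  PySem.List.sorted (cols.filter pred) (fun x => x) false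

def build_feature_families_py (feature_cols : List String) : List (String × List String) :=
  let cols := feature_cols
  let price_momentum := bffPick cols bffIsPm
  let vol_liquidity := bffPick cols bffIsVl
  let market_context := bffPick cols bffIsMc
  let fundamentals := bffPick cols bffIsFd
  [("price_momentum", price_momentum),
   ("vol_liquidity", vol_liquidity),
   ("market_context", market_context),
   ("fundamentals", fundamentals),
   ("all_features", PySem.List.sorted cols (fun x => x) false),
   ("price_plus_market",
     PySem.List.sorted (PySem.Set.union (PySem.Set.ofList price_momentum) (PySem.Set.ofList market_context)) (fun x => x) false),
   ("price_plus_fundamentals",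
     PySem.List.sorted (PySem.Set.union (PySem.Set.ofList price_momentum) (PySem.Set.ofList fundamentals)) (fun x => x) false)]

-- ===== PORT B =====
-- one classifying pass; state = (pm, vl, mc, fd, all, ppm, ppf)
def bffState : Type := List String × List String × List String × List String × List String × List String × List String

def bffStep (st : bffState) (c : String) : bffState :=
  let (pm, vl, mc, fd, al, ppm, ppf) := st
  let pm := if bffIsPm c then pm ++ [c] else pm
  let vl := if bffIsVl c then vl ++ [c] else vl
  let mc := if bffIsMc c then mc ++ [c] else mc
  let fd := if bffIsFd c then fd ++ [c] else fd
  let al := al ++ [c]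
  let ppm := if ((bffIsPm c || bffIsMc c) && ¬ ppm.contains c) then ppm ++ [c] else ppm
  let ppf := if ((bffIsPm c || bffIsFd c) && ¬ ppf.contains c) then ppf ++ [c] else ppf
  (pm, vl, mc, fd, al, ppm, ppf)

def build_feature_families_py_alt (feature_cols : List String) : List (String × List String) :=
  let st := feature_cols.foldl bffStep ([], [], [], [], [], [], [])
  let (pm, vl, mc, fd, al, ppm, ppf) := st
  [("price_momentum", PySem.List.sorted pm (fun x => x) false),
   ("vol_liquidity", PySem.List.sorted vl (fun x => x) false),
   ("market_context", PySem.List.sorted mc (fun x => x) false),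
   ("fundamentals", PySem.List.sorted fd (fun x => x) false),
   ("all_features", PySem.List.sorted al (fun x => x) false),
   ("price_plus_market", PySem.List.sorted ppm (fun x => x) false),
   ("price_plus_fundamentals", PySem.List.sorted ppf (fun x => x) false)]

-- ===== PRECONDITION & SPEC =====
def Spec_build_feature_families_py (feature_cols : List String) (out : List (String × List String)) : Prop := out = build_feature_families_py_alt feature_cols
instance (feature_cols : List String) (out : List (String × List String)) : Decidable (Spec_build_feature_families_py feature_cols out) := by unfold Spec_build_feature_families_py; infer_instance

-- ===== CLAIM (what is proved, stated in full; the proofs are below) =====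
def Claim_equal_build_feature_families_py : Prop := ∀ (feature_cols : List String), Dom_build_feature_families_py feature_cols → Spec_build_feature_families_py feature_cols (build_feature_families_py feature_cols)

-- ===== LEMMAS AND PROOFS =====

-- the loop characterised: each bucket is an append of a filter; the union buckets are Set.updates
theorem bffStep_foldl (cols : List String) (pm vl mc fd al ppm ppf : List String) :
    cols.foldl bffStep (pm, vl, mc, fd, al, ppm, ppf) =
      (pm ++ cols.filter bffIsPm, vl ++ cols.filter bffIsVl, mc ++ cols.filter bffIsMc,
       fd ++ cols.filter bffIsFd, al ++ cols,
       PySem.Set.update ppm (cols.filter (fun c => bffIsPm c || bffIsMc c)),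
       PySem.Set.update ppf (cols.filter (fun c => bffIsPm c || bffIsFd c))) := by
  induction cols generalizing pm vl mc fd al ppm ppf with
  | nil => simp [PySem.Set.update]
  | cons c cs ih =>
    simp only [List.foldl_cons, bffStep, List.filter_cons]
    rw [ih]
    have hset : ∀ (s : List String) (b : Bool),
        (if (b && ¬ s.contains c) then s ++ [c] else s) =
          if b then PySem.Set.add s c else s := by
      intro s b
      cases b <;> simp [PySem.Set.add, PySem.Set.contains]
    rw [hset ppm, hset ppf]
    by_cases h1 : bffIsPm c <;> by_cases h2 : bffIsVl c <;> by_cases h3 : bffIsMc c <;>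
      by_cases h4 : bffIsFd c <;>
      simp [h1, h2, h3, h4, PySem.Set.update_cons, List.append_assoc]

-- sorted-without-key of two Nodup lists with the same members agree
theorem bff_sorted_eq_of_same_mem (xs ys : List String) (hx : xs.Nodup) (hy : ys.Nodup)
    (h : ∀ a, a ∈ xs ↔ a ∈ ys) :
    PySem.List.sorted xs (fun x => x) false = PySem.List.sorted ys (fun x => x) false := by
  rw [PySem.List.sorted_id_eq_sorted_id_iff_perm]
  exact (List.perm_ext_iff_of_nodup hx hy).mpr h

-- the union bucket of A equals the dedup-filter bucket of B, after sorting
theorem bff_union_eq (cols : List String) (p q : String → Bool) :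
    PySem.List.sorted
      (PySem.Set.union (PySem.Set.ofList (bffPick cols p)) (PySem.Set.ofList (bffPick cols q)))
      (fun x => x) false =
    PySem.List.sorted (PySem.Set.ofList (cols.filter (fun c => p c || q c))) (fun x => x) false := by
  apply bff_sorted_eq_of_same_mem
  · exact PySem.Set.nodup_union _ _ (PySem.Set.nodup_ofList _)
  · exact PySem.Set.nodup_ofList _
  · intro a
    simp [PySem.Set.mem_union, PySem.Set.mem_ofList, bffPick, PySem.List.mem_sorted,
      List.mem_filter, and_or_left]

-- ===== VERDICT (by name: the statement is the Claim_ definition above) =====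
theorem build_feature_families_py_spec : Claim_equal_build_feature_families_py := by
  intro cols _
  unfold Spec_build_feature_families_py build_feature_families_py build_feature_families_py_alt
  rw [bffStep_foldl]
  simp only [List.nil_append, PySem.Set.update_nil_left]
  rw [bff_union_eq cols bffIsPm bffIsMc, bff_union_eq cols bffIsPm bffIsFd]
  simp [bffPick]
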